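-- pv_equiv track=rewrite | github.com/Wellan76/code-de-vigen-re | Projet_info_n1.py | IC8
-- ===== SOURCE A (Python) =====
-- def IC8(a:int):
--     str = ""
--     sous_chaine = []
--     for j in range(0,8):
--         for i in range(j,len(a),8):
--             str = str + a[i]
--         sous_chaine.append(str)
--         str = ""
--     return sous_chaine
-- ===== SOURCE B (Python) =====
-- def IC8(a):
--     buckets = [[] for _ in range(8)]
--     for i, ch in enumerate(a):
--         buckets[i % 8].append(ch)
--     return [''.join(b) for b in buckets]
-- ===== Notes on version B (the rewrite author's own statement) =====
-- stated objective: alternative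
-- what changed: A makes 8 separate strided inner passes over the string (one per residue class); B makes a single pass with enumerate, distributing each character into buckets[i % 8] and joining the buckets at the end.
import Mathlib
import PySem

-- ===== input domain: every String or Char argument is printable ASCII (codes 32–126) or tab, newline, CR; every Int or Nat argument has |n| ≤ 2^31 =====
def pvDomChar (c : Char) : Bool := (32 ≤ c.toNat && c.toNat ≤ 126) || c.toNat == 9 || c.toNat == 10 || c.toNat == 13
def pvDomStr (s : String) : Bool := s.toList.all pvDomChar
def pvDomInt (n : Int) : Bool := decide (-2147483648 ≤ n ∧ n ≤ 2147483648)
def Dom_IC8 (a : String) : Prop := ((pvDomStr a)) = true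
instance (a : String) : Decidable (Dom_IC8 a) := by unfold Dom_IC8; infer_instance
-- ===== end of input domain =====

-- B replaces A's 8 strided inner passes by one distribution pass into 8 buckets (alternative decomposition, same cost).

-- ===== PORT A =====
-- A: for j in range(0,8): inner strided loop 'for i in range(j, len(a), 8): str = str + a[i]';
-- the string accumulator is ported as a List Char (String.append is kernel-opaque); indices of the
-- inner range are always in bounds, so pyGetD is exact here.
def IC8 (a : String) : List String :=
  let cs := a.toList
  ((PySem.List.pyRange 0 8 1).foldl
      (fun (st : List String × List Char) j =>
        let s := (PySem.List.pyRange j (cs.length : Int) 8).foldl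
          (fun (s : List Char) i => s ++ [PySem.List.pyGetD cs i ' ']) st.2
        (st.1 ++ [String.ofList s], []))
      ([], [])).1

-- ===== PORT B =====
-- B: one pass 'for i, ch in enumerate(a): buckets[i % 8].append(ch)', then join each bucket.
def IC8_alt (a : String) : List String :=
  let buckets := (PySem.List.enumerate a.toList 0).foldl
    (fun (bs : List (List Char)) p => bs.modify (PySem.Int.mod p.1 8).toNat (fun b => b ++ [p.2]))
    (List.replicate 8 [])
  buckets.map (fun b => String.ofList b)

-- ===== PRECONDITION & SPEC =====
def Spec_IC8 (a : String) (out : List String) : Prop := out = IC8_alt a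
instance (a : String) (out : List String) : Decidable (Spec_IC8 a out) := by unfold Spec_IC8; infer_instance

-- ===== CLAIM (what is proved, stated in full; the proofs are below) =====
def Claim_equal_IC8 : Prop := ∀ (a : String), Dom_IC8 a → Spec_IC8 a (IC8 a)

-- ===== LEMMAS AND PROOFS =====

-- every 8th element of the list, first pick after skipping d elements
def strided : List Char → Nat → List Char
  | [], _ => []
  | c :: t, 0 => c :: strided t 7
  | _ :: t, d + 1 => strided t d

-- characters of cs (positions counted from k) whose absolute position is ≡ j (mod 8)
def sel (k : Int) (cs : List Char) (j : Nat) : List Char :=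
  match cs with
  | [] => []
  | c :: t => (if (PySem.Int.mod k 8).toNat = j then [c] else []) ++ sel (k + 1) t j

theorem pyRange_step8_shift (a b : Int) :
    PySem.List.pyRange (a + 1) (b + 1) 8 = (PySem.List.pyRange a b 8).map (· + 1) := by
  rw [PySem.List.pyRange_of_pos _ _ (by norm_num), PySem.List.pyRange_of_pos _ _ (by norm_num)]
  have h : b + 1 - (a + 1) = b - a := by ring
  rw [h, List.map_map]
  by_cases hab : a < b
  · rw [if_pos hab, if_pos (by omega : a + 1 < b + 1)]
    apply List.map_congr_left
    intro k _
    simp; ring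
  · rw [if_neg hab, if_neg (by omega : ¬ a + 1 < b + 1)]
    simp

theorem pyRange8_zero_cons (b : Int) (hb : 0 < b) :
    PySem.List.pyRange 0 b 8 = 0 :: PySem.List.pyRange 8 b 8 := by
  rw [PySem.List.pyRange_of_pos _ _ (by norm_num : (0:Int) < 8),
      PySem.List.pyRange_of_pos _ _ (by norm_num : (0:Int) < 8)]
  by_cases h8 : 8 < b
  · rw [if_pos hb, if_pos h8]
    have hM : ((b - 0 + 8 - 1) / 8).toNat = ((b - 8 + 8 - 1) / 8).toNat + 1 := by omega
    rw [hM, List.range_succ_eq_map, List.map_cons, List.map_map]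
    refine congrArg₂ _ (by norm_num) ?_
    apply List.map_congr_left
    intro k _
    simp; ring
  · rw [if_pos hb, if_neg h8]
    have hM : ((b - 0 + 8 - 1) / 8).toNat = 1 := by omega
    rw [hM]
    simp

theorem lemmaA (cs : List Char) (j : Int) (hj : 0 ≤ j) :
    (PySem.List.pyRange j (cs.length : Int) 8).map
      (fun i => PySem.List.pyGetD cs i ' ') = strided cs j.toNat := by
  induction cs generalizing j with
  | nil =>
    rw [PySem.List.pyRange_of_pos _ _ (by norm_num),
        if_neg (by simp only [List.length_nil, Nat.cast_zero]; omega)]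
    simp [strided]
  | cons c t ih =>
    by_cases hj0 : j = 0
    · subst hj0
      have hlen : ((c :: t).length : Int) = (t.length : Int) + 1 := by
        simp
      rw [hlen, pyRange8_zero_cons _ (by omega), List.map_cons]
      have hs := pyRange_step8_shift 7 (t.length : Int)
      norm_num at hs
      rw [hs, List.map_map]
      have htail : ((PySem.List.pyRange 7 (t.length : Int) 8).map
          ((fun i => PySem.List.pyGetD (c :: t) i ' ') ∘ (· + 1)))
          = (PySem.List.pyRange 7 (t.length : Int) 8).map
            (fun i => PySem.List.pyGetD t i ' ') := by
        apply List.map_congr_left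
        intro i hi
        have hmem := (PySem.List.mem_pyRange_iff_of_pos (by norm_num : (0:Int) < 8) i).mp hi
        have h7 : 7 ≤ i := by omega
        have hlt : i < (t.length : Int) := by
          rcases hmem with ⟨-, hlt, -⟩; omega
        have h1 : PySem.List.pyGetD (c :: t) (i + 1) ' ' = (c :: t)[(i+1).toNat] :=
          PySem.List.pyGetD_eq_getElem _ ' ' (by omega)
            (by simp only [List.length_cons]; push_cast; omega)
        have h2 : PySem.List.pyGetD t i ' ' = t[i.toNat] :=
          PySem.List.pyGetD_eq_getElem _ ' ' (by omega) hlt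
        have h3 : (i + 1).toNat = i.toNat + 1 := by omega
        simp only [Function.comp, h1, h2, h3]
        simp
      rw [htail, ih 7 (by norm_num)]
      have h0 : PySem.List.pyGetD (c :: t) 0 ' ' = c := PySem.List.pyGetD_zero_cons c t ' '
      simp [h0, strided]
    · have hj1 : 1 ≤ j := by omega
      have hlen : ((c :: t).length : Int) = (t.length : Int) + 1 := by simp
      have hs := pyRange_step8_shift (j - 1) (t.length : Int)
      have hjj : j - 1 + 1 = j := by ring
      rw [hjj] at hs
      rw [hlen, hs, List.map_map]
      have htail : ((PySem.List.pyRange (j-1) (t.length : Int) 8).map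
          ((fun i => PySem.List.pyGetD (c :: t) i ' ') ∘ (· + 1)))
          = (PySem.List.pyRange (j-1) (t.length : Int) 8).map
            (fun i => PySem.List.pyGetD t i ' ') := by
        apply List.map_congr_left
        intro i hi
        have hmem := (PySem.List.mem_pyRange_iff_of_pos (by norm_num : (0:Int) < 8) i).mp hi
        have hge : j - 1 ≤ i := hmem.1
        have hlt : i < (t.length : Int) := by rcases hmem with ⟨-, hlt, -⟩; omega
        have h1 : PySem.List.pyGetD (c :: t) (i + 1) ' ' = (c :: t)[(i+1).toNat] :=
          PySem.List.pyGetD_eq_getElem _ ' ' (by omega)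
            (by simp only [List.length_cons]; push_cast; omega)
        have h2 : PySem.List.pyGetD t i ' ' = t[i.toNat] :=
          PySem.List.pyGetD_eq_getElem _ ' ' (by omega) hlt
        have h3 : (i + 1).toNat = i.toNat + 1 := by omega
        simp only [Function.comp, h1, h2, h3]
        simp
      rw [htail, ih (j-1) (by omega)]
      have hd : j.toNat = (j-1).toNat + 1 := by omega
      rw [hd, strided]

theorem lemma_sel_strided (cs : List Char) (k : Int) (j : Nat) (hk : 0 ≤ k) (hj : j < 8) :
    sel k cs j = strided cs (((j : Int) - k) % 8).toNat := by
  induction cs generalizing k with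
  | nil => simp [sel, strided]
  | cons c t ih =>
    have hmod : PySem.Int.mod k 8 = k % 8 := by
      simp [PySem.Int.mod, Int.fmod_eq_emod]
    rw [sel, hmod]
    by_cases hc : (k % 8).toNat = j
    · rw [if_pos hc]
      have hd : (((j : Int) - k) % 8).toNat = 0 := by omega
      rw [hd, strided]
      have h7 : (((j : Int) - (k + 1)) % 8).toNat = 7 := by omega
      rw [ih (k+1) (by omega), h7]
      simp
    · rw [if_neg hc]
      have hd : (((j : Int) - k) % 8).toNat ≠ 0 := by omega
      obtain ⟨e, he⟩ := Nat.exists_eq_succ_of_ne_zero hd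
      rw [he, strided]
      have he' : (((j : Int) - (k + 1)) % 8).toNat = e := by omega
      rw [ih (k+1) (by omega), he']
      simp

theorem modify8_0 {f : List Char → List Char} (b0 b1 b2 b3 b4 b5 b6 b7 : List Char) :
    List.modify [b0,b1,b2,b3,b4,b5,b6,b7] 0 f = [f b0,b1,b2,b3,b4,b5,b6,b7] := rfl
theorem modify8_1 {f : List Char → List Char} (b0 b1 b2 b3 b4 b5 b6 b7 : List Char) :
    List.modify [b0,b1,b2,b3,b4,b5,b6,b7] 1 f = [b0,f b1,b2,b3,b4,b5,b6,b7] := rfl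
theorem modify8_2 {f : List Char → List Char} (b0 b1 b2 b3 b4 b5 b6 b7 : List Char) :
    List.modify [b0,b1,b2,b3,b4,b5,b6,b7] 2 f = [b0,b1,f b2,b3,b4,b5,b6,b7] := rfl
theorem modify8_3 {f : List Char → List Char} (b0 b1 b2 b3 b4 b5 b6 b7 : List Char) :
    List.modify [b0,b1,b2,b3,b4,b5,b6,b7] 3 f = [b0,b1,b2,f b3,b4,b5,b6,b7] := rfl
theorem modify8_4 {f : List Char → List Char} (b0 b1 b2 b3 b4 b5 b6 b7 : List Char) :
    List.modify [b0,b1,b2,b3,b4,b5,b6,b7] 4 f = [b0,b1,b2,b3,f b4,b5,b6,b7] := rfl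
theorem modify8_5 {f : List Char → List Char} (b0 b1 b2 b3 b4 b5 b6 b7 : List Char) :
    List.modify [b0,b1,b2,b3,b4,b5,b6,b7] 5 f = [b0,b1,b2,b3,b4,f b5,b6,b7] := rfl
theorem modify8_6 {f : List Char → List Char} (b0 b1 b2 b3 b4 b5 b6 b7 : List Char) :
    List.modify [b0,b1,b2,b3,b4,b5,b6,b7] 6 f = [b0,b1,b2,b3,b4,b5,f b6,b7] := rfl
theorem modify8_7 {f : List Char → List Char} (b0 b1 b2 b3 b4 b5 b6 b7 : List Char) :
    List.modify [b0,b1,b2,b3,b4,b5,b6,b7] 7 f = [b0,b1,b2,b3,b4,b5,b6,f b7] := rfl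

theorem lemmaB (cs : List Char) (k : Int) (hk : 0 ≤ k)
    (b0 b1 b2 b3 b4 b5 b6 b7 : List Char) :
    (PySem.List.enumerate cs k).foldl
      (fun (bs : List (List Char)) p => bs.modify (PySem.Int.mod p.1 8).toNat (fun b => b ++ [p.2]))
      [b0, b1, b2, b3, b4, b5, b6, b7]
    = [b0 ++ sel k cs 0, b1 ++ sel k cs 1, b2 ++ sel k cs 2, b3 ++ sel k cs 3,
       b4 ++ sel k cs 4, b5 ++ sel k cs 5, b6 ++ sel k cs 6, b7 ++ sel k cs 7] := by
  induction cs generalizing k b0 b1 b2 b3 b4 b5 b6 b7 with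
  | nil => simp [PySem.List.enumerate_nil, sel]
  | cons c t ih =>
    simp only [PySem.List.enumerate_cons, List.foldl_cons]
    have hmod : PySem.Int.mod k 8 = k % 8 := by
      simp [PySem.Int.mod, Int.fmod_eq_emod]
    have hm : k % 8 = 0 ∨ k % 8 = 1 ∨ k % 8 = 2 ∨ k % 8 = 3 ∨
        k % 8 = 4 ∨ k % 8 = 5 ∨ k % 8 = 6 ∨ k % 8 = 7 := by omega
    rcases hm with h | h | h | h | h | h | h | h <;>
      simp only [hmod, h, show (0:Int).toNat = 0 from rfl, show (1:Int).toNat = 1 from rfl,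
        show (2:Int).toNat = 2 from rfl, show (3:Int).toNat = 3 from rfl,
        show (4:Int).toNat = 4 from rfl, show (5:Int).toNat = 5 from rfl,
        show (6:Int).toNat = 6 from rfl, show (7:Int).toNat = 7 from rfl,
        modify8_0, modify8_1, modify8_2, modify8_3, modify8_4, modify8_5,
        modify8_6, modify8_7] <;>
      rw [ih (k+1) (by omega)] <;>
      simp [sel, hmod, h, List.append_assoc]

-- ===== VERDICT (by name: the statement is the Claim_ definition above) =====
theorem IC8_spec : Claim_equal_IC8 := by
  intro a _
  unfold Spec_IC8 IC8 IC8_alt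
  have hr : PySem.List.pyRange 0 8 1 = [0,1,2,3,4,5,6,7] := by decide
  rw [hr]
  simp only [List.foldl_cons, List.foldl_nil, List.replicate]
  rw [lemmaB a.toList 0 le_rfl]
  simp only [PySem.List.foldl_append_singleton_eq_map]
  have key : ∀ j : Nat, j < 8 →
      (PySem.List.pyRange (j : Int) (a.toList.length : Int) 8).map
        (fun i => PySem.List.pyGetD a.toList i ' ') = sel 0 a.toList j := by
    intro j hj
    rw [lemmaA a.toList j (by omega), lemma_sel_strided a.toList 0 j le_rfl hj]
    congr 1
    omega
  have k0 := key 0 (by norm_num); have k1 := key 1 (by norm_num)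
  have k2 := key 2 (by norm_num); have k3 := key 3 (by norm_num)
  have k4 := key 4 (by norm_num); have k5 := key 5 (by norm_num)
  have k6 := key 6 (by norm_num); have k7 := key 7 (by norm_num)
  norm_num at k0 k1 k2 k3 k4 k5 k6 k7 ⊢
  rw [k0, k1, k2, k3, k4, k5, k6, k7]
  simp
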